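-- pv_equiv track=rewrite | github.com/liskos/ovsynnikov | zadanie_15/42.py | func
-- ===== SOURCE A (Python) =====
-- def func(a):
--     p = list(range(10, 26))
--     q = list(range(0, 13))
--     for x in range(-100, 100):
--         f = (x in a) or (x not in p) or (x in q)
--         if not f:
--             return False
--     return True
-- ===== SOURCE B (Python) =====
-- def func(a):
--     target = set(range(13, 26))
--     seen = set()
--     for e in a:
--         if e in target:
--             seen.add(e)
--     return seen == target
-- ===== Notes on version B (the rewrite author's own statement) =====
-- stated objective: faster
-- what changed: Replaces A's scan of a fixed -100..99 range with repeated membership tests in a by a single pass over a that accumulates which of the targets 13..25 appear, then compares the accumulated set to the target set.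
import Mathlib
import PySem

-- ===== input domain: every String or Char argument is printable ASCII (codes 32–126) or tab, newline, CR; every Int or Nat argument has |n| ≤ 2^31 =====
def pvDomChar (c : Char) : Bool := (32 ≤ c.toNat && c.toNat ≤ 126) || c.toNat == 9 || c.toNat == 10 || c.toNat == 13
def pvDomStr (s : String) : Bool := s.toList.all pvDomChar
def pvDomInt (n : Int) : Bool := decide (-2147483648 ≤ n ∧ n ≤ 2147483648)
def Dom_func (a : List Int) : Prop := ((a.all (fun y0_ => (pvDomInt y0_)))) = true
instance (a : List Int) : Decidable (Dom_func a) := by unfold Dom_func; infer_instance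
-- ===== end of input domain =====

-- B replaces A's scan over the fixed range -100..99 (each step a membership test in a)
-- by a single pass over a accumulating which targets 13..25 appear; objective: faster (constant factor).

-- ===== PORT A =====
-- loop 'for x in range(-100, 100)' with early return False
def funcLoopA (a p q : List Int) : List Int → Bool
  | [] => true
  | x :: rest =>
      let f := a.contains x || !(p.contains x) || q.contains x
      if !f then false else funcLoopA a p q rest

def func (a : List Int) : Bool :=
  let p := PySem.List.pyRange 10 26 1
  let q := PySem.List.pyRange 0 13 1
  funcLoopA a p q (PySem.List.pyRange (-100) 100 1)

-- ===== PORT B =====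
def func_alt (a : List Int) : Bool :=
  let target : PySem.Set Int := PySem.Set.ofList (PySem.List.pyRange 13 26 1)
  let seen : PySem.Set Int :=
    a.foldl (fun s e => if target.contains e then PySem.Set.add s e else s) PySem.Set.empty
  PySem.Set.equal seen target

-- ===== PRECONDITION & SPEC =====
def Spec_func (a : List Int) (out : Bool) : Prop := out = func_alt a
instance (a : List Int) (out : Bool) : Decidable (Spec_func a out) := by unfold Spec_func; infer_instance

-- ===== CLAIM (what is proved, stated in full; the proofs are below) =====
def Claim_equal_func : Prop := ∀ (a : List Int), Dom_func a → Spec_func a (func a)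

-- ===== LEMMAS AND PROOFS =====

-- A's loop is an 'all' over the range
theorem funcLoopA_eq_all (a p q xs : List Int) :
    funcLoopA a p q xs = xs.all (fun x => a.contains x || !(p.contains x) || q.contains x) := by
  induction xs with
  | nil => rfl
  | cons x rest ih =>
      simp only [funcLoopA, List.all_cons, ih]
      by_cases h : (a.contains x || !(p.contains x) || q.contains x) = true <;> simp_all

-- membership in B's accumulated 'seen' set (generic over the filter predicate)
theorem mem_seen_fold (P : Int → Prop) [DecidablePred P] (a : List Int)
    (s : PySem.Set Int) (x : Int) :
    x ∈ a.foldl (fun s e => if P e then PySem.Set.add s e else s) s ↔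
      x ∈ s ∨ (P x ∧ x ∈ a) := by
  induction a generalizing s with
  | nil => simp
  | cons e rest ih =>
      simp only [List.foldl_cons]
      by_cases he : P e
      · rw [if_pos he, ih]
        simp only [PySem.Set.mem_add, List.mem_cons]
        constructor
        · rintro (⟨hs | hx⟩ | ⟨ht, hr⟩)
          · exact Or.inl hs
          · subst hx; exact Or.inr ⟨he, Or.inl rfl⟩
          · exact Or.inr ⟨ht, Or.inr hr⟩
        · rintro (hs | ⟨ht, (hx | hr)⟩)
          · exact Or.inl (Or.inl hs)
          · exact Or.inl (Or.inr hx)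
          · exact Or.inr ⟨ht, hr⟩
      · rw [if_neg he, ih]
        simp only [List.mem_cons]
        constructor
        · rintro (hs | ⟨ht, hr⟩)
          · exact Or.inl hs
          · exact Or.inr ⟨ht, Or.inr hr⟩
        · rintro (hs | ⟨ht, (hx | hr)⟩)
          · exact Or.inl hs
          · subst hx; exact absurd ht he
          · exact Or.inr ⟨ht, hr⟩

theorem func_iff (a : List Int) :
    func a = true ↔ ∀ x : Int, 13 ≤ x → x < 26 → x ∈ a := by
  unfold func
  rw [funcLoopA_eq_all]
  simp only [List.all_eq_true, Bool.or_eq_true, Bool.not_eq_true', List.contains_eq_mem,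
    decide_eq_true_eq, decide_eq_false_iff_not, PySem.List.mem_pyRange_one]
  constructor
  · intro h x h13 h26
    rcases h x ⟨by omega, by omega⟩ with (hx | hnp) | hq
    · exact hx
    · exact absurd (⟨by omega, by omega⟩ : (10:Int) ≤ x ∧ x < 26) hnp
    · omega
  · intro h x _
    by_cases hx : 13 ≤ x ∧ x < 26
    · exact Or.inl (Or.inl (h x hx.1 hx.2))
    · by_cases hq : 0 ≤ x ∧ x < 13
      · exact Or.inr hq
      · exact Or.inl (Or.inr (by omega))

theorem func_alt_iff (a : List Int) :
    func_alt a = true ↔ ∀ x : Int, 13 ≤ x → x < 26 → x ∈ a := by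
  unfold func_alt
  simp only [PySem.Set.equal, Bool.and_eq_true, PySem.Set.issubset, List.all_eq_true,
    PySem.Set.contains, List.contains_eq_mem, decide_eq_true_eq]
  simp only [mem_seen_fold (fun e => e ∈ PySem.Set.ofList (PySem.List.pyRange 13 26 1))]
  simp only [PySem.Set.mem_ofList, PySem.List.mem_pyRange_one, PySem.Set.empty,
    List.not_mem_nil, false_or]
  constructor
  · intro ⟨_, h2⟩ x h13 h26
    exact (h2 x ⟨h13, h26⟩).2
  · intro h
    exact ⟨fun x hx => hx.1, fun x hx => ⟨hx, h x hx.1 hx.2⟩⟩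

-- ===== VERDICT (by name: the statement is the Claim_ definition above) =====
theorem func_spec : Claim_equal_func := by
  intro a _
  unfold Spec_func
  rw [Bool.eq_iff_iff, func_iff, func_alt_iff]
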